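-- pv_equiv track=rewrite | github.com/CaptainMK25/Neural-Network | utils/visual_helpers.py | get_coordinate
-- ===== SOURCE A (Python) =====
-- def get_coordinate(middle_index, current_index, length, node_radius):
--     '''
--     Returns the needed coordinate for the given node characteristics
--
--     Parameters
--     ----------
--     middle_index: int
--         The index of the layer in the middle of the neural network
--     current_index: int
--         The index of the current node's layer
--     length: int
--         The length between layers or nodes if we're getting the x or y coordinate respectively
--     node_radius: int
--         The node radius for every node in the video
--     '''
--     difference_index = abs(middle_index - current_index)
--
--     total = 0
--     while difference_index > 0:
--         if difference_index >= 1: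
--             total += length + (2 * node_radius)
--             difference_index -= 1
--
--         else:
--             total += (length/2) + node_radius
--             difference_index -= 0.5
--
--     total = get_sign(middle_index, current_index) * total
--
--     return total
--
-- def get_sign(middle_index, current_index):
--     '''
--     Returns the sign of the coordinate depending on the position of the current node. Left to the middle is a negative sign, right to the middle is a positive sign
--
--     Parameters
--     ----------
--     middle_index: int
--         The index of the layer in the middle of the neural network
--     current_index: int
--         The index of the current node's layer
--     '''
--     if middle_index > current_index:
--         return -1
--
--     else:
--         return 1
-- ===== SOURCE B (Python) =====
-- def get_coordinate(middle_index, current_index, length, node_radius):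
--     # Closed form: sign(current-middle)*|middle-current| == current_index - middle_index
--     return (current_index - middle_index) * (length + 2 * node_radius)
-- ===== Notes on version B (the rewrite author's own statement) =====
-- stated objective: faster
-- what changed: Replaces the while-loop that adds (length+2*node_radius) once per index of difference with the closed form (current_index - middle_index) * (length + 2*node_radius).
import Mathlib
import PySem

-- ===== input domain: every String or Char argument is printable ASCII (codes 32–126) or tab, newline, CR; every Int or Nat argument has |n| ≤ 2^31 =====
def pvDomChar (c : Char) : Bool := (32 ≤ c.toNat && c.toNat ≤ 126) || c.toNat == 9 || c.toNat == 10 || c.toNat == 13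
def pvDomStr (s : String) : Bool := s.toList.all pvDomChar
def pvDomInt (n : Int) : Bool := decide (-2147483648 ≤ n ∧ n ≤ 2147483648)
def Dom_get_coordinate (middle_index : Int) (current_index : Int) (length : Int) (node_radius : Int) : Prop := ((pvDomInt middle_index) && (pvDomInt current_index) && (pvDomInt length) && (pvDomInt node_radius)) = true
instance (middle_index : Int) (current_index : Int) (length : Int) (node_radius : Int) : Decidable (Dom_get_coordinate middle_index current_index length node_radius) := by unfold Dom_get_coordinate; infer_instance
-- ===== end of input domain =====

-- ===== PORT A =====
-- while loop of A: with integer inputs difference_index is an integer ≥ 0, so only the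
-- `difference_index >= 1` branch ever runs; recursion on the (nonnegative) counter.
def get_coordinate_loop (difference_index : Int) (total : Int) (length : Int) (node_radius : Int) : Int :=
  if h : difference_index > 0 then
    get_coordinate_loop (difference_index - 1) (total + (length + 2 * node_radius)) length node_radius
  else
    total
termination_by difference_index.toNat
decreasing_by omega

def get_sign (middle_index : Int) (current_index : Int) : Int :=
  if middle_index > current_index then -1 else 1

def get_coordinate (middle_index : Int) (current_index : Int) (length : Int) (node_radius : Int) : Int :=
  get_sign middle_index current_index *
    get_coordinate_loop (|middle_index - current_index|) 0 length node_radius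

-- ===== PORT B =====
def get_coordinate_alt (middle_index : Int) (current_index : Int) (length : Int) (node_radius : Int) : Int :=
  (current_index - middle_index) * (length + 2 * node_radius)

-- ===== PRECONDITION & SPEC =====
def Spec_get_coordinate (middle_index : Int) (current_index : Int) (length : Int) (node_radius : Int) (out : Int) : Prop := out = get_coordinate_alt middle_index current_index length node_radius
instance (middle_index : Int) (current_index : Int) (length : Int) (node_radius : Int) (out : Int) : Decidable (Spec_get_coordinate middle_index current_index length node_radius out) := by unfold Spec_get_coordinate; infer_instance

-- ===== CLAIM (what is proved, stated in full; the proofs are below) =====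
def Claim_equal_get_coordinate : Prop := ∀ (middle_index : Int) (current_index : Int) (length : Int) (node_radius : Int), Dom_get_coordinate middle_index current_index length node_radius → Spec_get_coordinate middle_index current_index length node_radius (get_coordinate middle_index current_index length node_radius)

-- ===== LEMMAS AND PROOFS =====

-- ===== VERDICT (by name: the statement is the Claim_ definition above) =====
theorem get_coordinate_loop_eq (d total length node_radius : Int) (hd : 0 ≤ d) :
    get_coordinate_loop d total length node_radius = total + d * (length + 2 * node_radius) := by
  induction d, total using get_coordinate_loop.induct length node_radius with
  | case1 d total h ih =>
    rw [get_coordinate_loop, dif_pos h, ih (by omega)]; ring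
  | case2 d total h =>
    have : d = 0 := by omega
    rw [get_coordinate_loop, dif_neg h, this]; ring

theorem get_coordinate_spec : Claim_equal_get_coordinate := by
  intro m c L r _
  show get_coordinate m c L r = get_coordinate_alt m c L r
  unfold get_coordinate get_coordinate_alt get_sign
  rw [get_coordinate_loop_eq _ _ _ _ (abs_nonneg _)]
  rcases le_or_gt m c with h | h
  · rw [if_neg (by omega), abs_of_nonpos (by omega)]; ring
  · rw [if_pos h, abs_of_pos (by omega)]; ring
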